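-- pv_equiv track=rewrite | github.com/calderov/coding_interview_problems | Exercises/TwoPointers/02RemoveDuplicates.py | RemoveKeyFromUnsortedArray
-- ===== SOURCE A (Python) =====
-- def RemoveKeyFromUnsortedArray(arr, key):
--     lnk = 0 # Last non-key index
--     for i in range(len(arr)):
--         if arr[i] != key:
--             arr[lnk] = arr[i]
--             lnk += 1
--
--     # Ensure values after lnk are set to key
--     for i in range(lnk, len(arr)):
--         arr[i] = key
--
--     return lnk
-- ===== SOURCE B (Python) =====
-- def RemoveKeyFromUnsortedArray(arr, key):
--     removed = 0
--     while key in arr: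
--         arr.remove(key)
--         removed += 1
--     arr.extend([key] * removed)
--     return len(arr) - removed
-- ===== Notes on version B (the rewrite author's own statement) =====
-- stated objective: alternative
-- what changed: Replaces the single-pass two-pointer write-cursor compaction with repeated first-occurrence deletion: a while loop calls arr.remove(key) until no key remains, then pads the array with the removed keys and returns len(arr) minus the number of removals.
import Mathlib
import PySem

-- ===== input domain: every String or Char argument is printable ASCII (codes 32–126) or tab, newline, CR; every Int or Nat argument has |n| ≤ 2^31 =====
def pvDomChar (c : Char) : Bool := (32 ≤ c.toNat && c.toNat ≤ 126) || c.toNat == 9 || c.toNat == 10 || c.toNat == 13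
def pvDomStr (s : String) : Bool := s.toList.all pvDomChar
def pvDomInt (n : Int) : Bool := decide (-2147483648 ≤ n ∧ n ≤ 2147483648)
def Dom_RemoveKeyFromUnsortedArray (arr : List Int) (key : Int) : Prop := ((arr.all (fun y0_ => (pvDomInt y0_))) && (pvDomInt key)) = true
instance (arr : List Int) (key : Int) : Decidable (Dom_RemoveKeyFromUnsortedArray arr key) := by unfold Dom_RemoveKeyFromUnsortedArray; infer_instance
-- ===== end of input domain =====

-- B replaces A's single-pass write-cursor compaction by repeated first-occurrence deletion
-- plus padding; the equivalence proved here is about the RETURN value only (both Pythons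
-- mutate arr identically in place).

-- ===== PORT A =====
-- Loop body of A's first loop: read arr[i]; if it is not key, write it at the cursor and advance.
def pvStepA (key : Int) (st : List Int × Nat) (i : Nat) : List Int × Nat :=
  let v := st.1.getD i 0
  if v ≠ key then (st.1.set st.2 v, st.2 + 1) else st

def RemoveKeyFromUnsortedArray (arr : List Int) (key : Int) : Int :=
  -- first loop: write cursor lnk over the same array (`range(len(arr))`, nonnegative indices)
  let st := (List.range arr.length).foldl (pvStepA key) (arr, 0)
  -- second loop (`for i in range(lnk, len(arr)): arr[i] = key`) only mutates arr
  let _ := (List.range' st.2 (arr.length - st.2)).foldl (fun a i => a.set i key) st.1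
  (st.2 : Int)

-- ===== PORT B =====
-- `while key in arr: arr.remove(key); removed += 1` — PySem.List.remove? is Python's
-- list.remove (none exactly when `key in arr` is false, so the while loop stops).
def pvWhileB (key : Int) (a : List Int) (removed : Nat) : List Int × Nat :=
  match hr : PySem.List.remove? a key with
  | some a' => pvWhileB key a' (removed + 1)
  | none => (a, removed)
termination_by a.length
decreasing_by
  have hm : key ∈ a := by
    by_contra hn
    rw [(PySem.List.remove?_eq_none_iff a key).mpr hn] at hr
    cases hr
  rw [PySem.List.remove?_eq_some_erase a key hm] at hr
  cases hr
  have h1 := List.length_erase_of_mem hm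
  have h2 : 0 < a.length := List.length_pos_of_mem hm
  rw [h1]
  omega

def RemoveKeyFromUnsortedArray_alt (arr : List Int) (key : Int) : Int :=
  let st := pvWhileB key arr 0
  -- `arr.extend([key] * removed)` (mutation); then `return len(arr) - removed`
  let a2 := st.1 ++ List.replicate st.2 key
  (a2.length : Int) - (st.2 : Int)

-- ===== PRECONDITION & SPEC =====
def Spec_RemoveKeyFromUnsortedArray (arr : List Int) (key : Int) (out : Int) : Prop := out = RemoveKeyFromUnsortedArray_alt arr key
instance (arr : List Int) (key : Int) (out : Int) : Decidable (Spec_RemoveKeyFromUnsortedArray arr key out) := by unfold Spec_RemoveKeyFromUnsortedArray; infer_instance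

-- ===== CLAIM =====
def Claim_equal_RemoveKeyFromUnsortedArray : Prop := ∀ (arr : List Int) (key : Int), Dom_RemoveKeyFromUnsortedArray arr key → Spec_RemoveKeyFromUnsortedArray arr key (RemoveKeyFromUnsortedArray arr key)

-- ===== LEMMAS AND PROOFS =====
-- Loop invariant for A's first loop: folding over indices m..m+n-1, with write cursor lnk ≤ m
-- and the working array a agreeing with the original arr at every index ≥ m, yields cursor
-- lnk + (number of non-key elements in arr.drop m).
theorem removeLoop (key : Int) (arr : List Int) :
    ∀ (n m : Nat) (a : List Int) (lnk : Nat), m + n = arr.length → lnk ≤ m →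
      (∀ j, m ≤ j → a.getD j 0 = arr.getD j 0) →
      ((List.range' m n).foldl (pvStepA key) (a, lnk)).2
      = lnk + (arr.drop m).countP (fun x => decide (x ≠ key)) := by
  intro n
  induction n with
  | zero =>
    intro m a lnk hmn _ _
    have hdrop : arr.drop m = [] := List.drop_of_length_le (by omega)
    simp [hdrop]
  | succ n ih =>
    intro m a lnk hmn hlnk hagree
    have hm : m < arr.length := by omega
    have hv : a.getD m 0 = arr.getD m 0 := hagree m (le_refl m)
    have hget : arr.getD m 0 = arr[m] := List.getD_eq_getElem arr 0 hm
    have hdrop : arr.drop m = arr[m] :: arr.drop (m + 1) := List.drop_eq_getElem_cons hm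
    rw [List.range'_succ, List.foldl_cons]
    by_cases hk : a.getD m 0 ≠ key
    · have hstep : pvStepA key (a, lnk) m = (a.set lnk (a.getD m 0), lnk + 1) := by
        simp only [pvStepA]; rw [if_pos hk]
      have hres := ih (m + 1) (a.set lnk (a.getD m 0)) (lnk + 1) (by omega) (by omega)
        (by
          intro j hj
          have hne : lnk ≠ j := by omega
          rw [List.getD_eq_getElem?_getD, List.getElem?_set_ne hne,
              ← List.getD_eq_getElem?_getD]
          exact hagree j (by omega))
      rw [hstep, hres]
      have hxk : (decide (arr[m] ≠ key)) = true := by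
        simp only [decide_eq_true_eq]
        rw [← hget, ← hv]; exact hk
      rw [hdrop, List.countP_cons, hxk]
      simp only [reduceIte]
      omega
    · have hstep : pvStepA key (a, lnk) m = (a, lnk) := by
        simp only [pvStepA]; rw [if_neg hk]
      have hres := ih (m + 1) a lnk (by omega) (by omega)
        (fun j hj => hagree j (by omega))
      rw [hstep, hres]
      have hxk : (decide (arr[m] ≠ key)) = false := by
        simp only [decide_eq_false_iff_not, not_not]
        rw [← hget, ← hv]; simpa using hk
      rw [hdrop, List.countP_cons, hxk]
      simp

-- B's while loop: the surviving list's length is the number of non-key elements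
-- (strong induction on the list length; each arr.remove(key) erases one key element,
-- which leaves the non-key count unchanged).
theorem whileB_fst_length (key : Int) :
    ∀ (a : List Int) (removed : Nat),
      (pvWhileB key a removed).1.length = a.countP (fun x => decide (x ≠ key)) := by
  intro a
  induction a using (measure List.length).wf.induction with
  | _ a ih =>
    intro removed
    rw [pvWhileB.eq_def]
    split
    · rename_i a' hr
      have hm : key ∈ a := by
        by_contra hn
        rw [(PySem.List.remove?_eq_none_iff a key).mpr hn] at hr
        cases hr
      have ha' : a' = a.erase key := by
        rw [PySem.List.remove?_eq_some_erase a key hm] at hr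
        exact (Option.some.inj hr).symm
      subst ha'
      have h1 := List.length_erase_of_mem hm
      have h2 : 0 < a.length := List.length_pos_of_mem hm
      have hlt : (a.erase key).length < a.length := by rw [h1]; omega
      rw [ih (a.erase key) hlt (removed + 1)]
      have hperm : List.Perm a (key :: a.erase key) := List.perm_cons_erase hm
      rw [hperm.countP_eq, List.countP_cons]
      simp
    · rename_i hr
      have hm : key ∉ a := (PySem.List.remove?_eq_none_iff a key).mp hr
      have hall : ∀ x ∈ a, decide (x ≠ key) = true := by
        intro x hx
        simp only [decide_eq_true_eq]
        intro h; exact hm (h ▸ hx)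
      rw [List.countP_eq_length.mpr hall]

-- ===== VERDICT =====
theorem RemoveKeyFromUnsortedArray_spec : Claim_equal_RemoveKeyFromUnsortedArray := by
  intro arr key _
  have hA := removeLoop key arr arr.length 0 arr 0 (by omega) (by omega) (fun j _ => rfl)
  have hB := whileB_fst_length key arr 0
  show (((List.range arr.length).foldl (pvStepA key) (arr, 0)).2 : Int)
      = (((pvWhileB key arr 0).1 ++ List.replicate (pvWhileB key arr 0).2 key).length : Int)
        - ((pvWhileB key arr 0).2 : Int)
  rw [List.range_eq_range', hA, List.drop_zero, List.length_append, List.length_replicate, hB]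
  push_cast
  ring
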